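-- pv_equiv track=rewrite | github.com/Drills-hub/codes | 백준/Silver/4659. 비밀번호 발음하기/비밀번호 발음하기.py | valid_succession_word
-- ===== SOURCE A (Python) =====
-- def valid_succession_word(word):
--     vowels = 'aeiou'
--     word = word.lower()
--
--     for i in range(len(word) - 2):
--         current = word[i:i+3]
--         all_vowels = True
--         for c in current:
--             if c not in vowels:
--                 all_vowels = False
--                 break
--         all_consonants = True
--         for c in current:
--             if c in vowels or not c.isalpha():
--                 all_consonants = False
--                 break
--
--         if all_vowels or all_consonants:
--             return False
--     return True
-- ===== SOURCE B (Python) =====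
-- def valid_succession_word(word):
--     run = 0          # length of the current same-class run (vowel or consonant)
--     cls = None       # class of that run: 'v', 'c', or None (no active run)
--     for ch in word.lower():
--         if ch in 'aeiou':
--             k = 'v'
--         elif ch.isalpha():
--             k = 'c'
--         else:
--             k = None
--         if k is None:
--             cls, run = None, 0
--         elif k == cls:
--             run += 1
--             if run == 3:
--                 return False
--         else:
--             cls, run = k, 1
--     return True
-- ===== Notes on version B (the rewrite author's own statement) =====
-- stated objective: alternative
-- what changed: Replaced A's overlapping 3-character window slicing (with two inner all-vowel/all-consonant scans per window) by a single left-to-right pass that classifies each character once and keeps a run-class with a run-length counter, failing as soon as a run reaches 3.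
import Mathlib
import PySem

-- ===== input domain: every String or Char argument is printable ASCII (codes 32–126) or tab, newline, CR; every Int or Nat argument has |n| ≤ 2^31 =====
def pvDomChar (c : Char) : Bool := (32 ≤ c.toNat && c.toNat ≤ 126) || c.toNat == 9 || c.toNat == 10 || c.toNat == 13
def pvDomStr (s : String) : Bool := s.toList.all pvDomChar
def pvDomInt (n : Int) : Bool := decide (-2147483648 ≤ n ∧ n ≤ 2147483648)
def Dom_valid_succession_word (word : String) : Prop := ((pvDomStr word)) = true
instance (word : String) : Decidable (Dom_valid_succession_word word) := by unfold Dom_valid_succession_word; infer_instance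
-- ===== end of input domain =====

-- B replaces A's overlapping 3-char window slicing by a single pass keeping a run-class and
-- run-length counter (objective: simpler/alternative decomposition; same O(n) cost).

-- 'c in "aeiou"' for a single character = membership among these chars (exact for length-1 needles)
def pvVowel (c : Char) : Bool := ['a', 'e', 'i', 'o', 'u'].contains c

-- ===== PORT A =====
-- inner loop `for c in current: if c not in vowels: all_vowels = False; break`
def vswA_allVowels : List Char → Bool
  | [] => true
  | c :: rest => if !(pvVowel c) then false else vswA_allVowels rest

-- inner loop `for c in current: if c in vowels or not c.isalpha(): all_consonants = False; break`
def vswA_allCons : List Char → Bool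
  | [] => true
  | c :: rest => if pvVowel c || !(PySem.Chars.isalpha c) then false else vswA_allCons rest

-- `for i in range(len(word) - 2)` with early `return False`; range of a nonpositive bound is
-- empty, which Nat subtraction gives as well
def vswA_loop (w : List Char) : List Nat → Bool
  | [] => true
  | i :: rest =>
    let cur := PySem.List.slice w (some (i : Int)) (some ((i : Int) + 3))
    if vswA_allVowels cur || vswA_allCons cur then false else vswA_loop w rest

def valid_succession_word (word : String) : Bool :=
  let w := PySem.Chars.lower word.toList
  vswA_loop w (List.range (w.length - 2))

-- ===== PORT B =====
def vswB_class (c : Char) : Option Bool :=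
  if pvVowel c then some true
  else if PySem.Chars.isalpha c then some false
  else none

def vswB_loop : List Char → Option Bool → Nat → Bool
  | [], _, _ => true
  | c :: rest, cls, run =>
    match vswB_class c with
    | none => vswB_loop rest none 0
    | some v =>
      if some v == cls then
        if run + 1 == 3 then false else vswB_loop rest cls (run + 1)
      else vswB_loop rest (some v) 1

def valid_succession_word_alt (word : String) : Bool :=
  vswB_loop (PySem.Chars.lower word.toList) none 0

-- ===== PRECONDITION & SPEC =====
def Spec_valid_succession_word (word : String) (out : Bool) : Prop := out = valid_succession_word_alt word
instance (word : String) (out : Bool) : Decidable (Spec_valid_succession_word word out) := by unfold Spec_valid_succession_word; infer_instance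

-- ===== CLAIM (what is proved, stated in full; the proofs are below) =====
def Claim_equal_valid_succession_word : Prop := ∀ (word : String), Dom_valid_succession_word word → Spec_valid_succession_word word (valid_succession_word word)

-- ===== LEMMAS AND PROOFS =====

-- proof-side reference scanner: structural window walk
def sameRun (a b c : Char) : Bool :=
  decide (vswB_class a = vswB_class b ∧ vswB_class b = vswB_class c ∧ vswB_class c ≠ none)

def scan3 : List Char → Bool
  | a :: b :: c :: rest => if sameRun a b c then false else scan3 (b :: c :: rest)
  | _ => true

theorem scan3_short (l : List Char) (h : l.length ≤ 2) : scan3 l = true := by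
  match l with
  | [] => rfl
  | [_] => rfl
  | [_, _] => rfl
  | _ :: _ :: _ :: _ => simp at h

theorem window_eq_sameRun (a b c : Char) :
    (vswA_allVowels [a, b, c] || vswA_allCons [a, b, c]) = sameRun a b c := by
  cases hva : pvVowel a <;> cases hvb : pvVowel b <;> cases hvc : pvVowel c <;>
    cases haa : PySem.Chars.isalpha a <;> cases hab : PySem.Chars.isalpha b <;>
    cases hac : PySem.Chars.isalpha c <;>
    simp [vswA_allVowels, vswA_allCons, sameRun, vswB_class, hva, hvb, hvc, haa, hab, hac]

theorem vswA_loop_cons_map (x : Char) (w : List Char) (is : List Nat) :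
    vswA_loop (x :: w) (is.map Nat.succ) = vswA_loop w is := by
  induction is with
  | nil => rfl
  | cons i rest ih =>
    have hs : ∀ (l : List Char) (j : Nat),
        PySem.List.slice l (some (j : Int)) (some ((j : Int) + 3)) = (l.drop j).take 3 := by
      intro l j
      have := PySem.List.slice_natCast_add (xs := l) (j := j) (n := 3)
      simpa using this
    simp only [List.map, vswA_loop, hs, Nat.succ_eq_add_one, List.drop_succ_cons]
    rw [ih]

theorem vswA_eq_scan3 (w : List Char) :
    vswA_loop w (List.range (w.length - 2)) = scan3 w := by
  have hcur : ∀ (a b c : Char) (rest : List Char),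
      PySem.List.slice (a :: b :: c :: rest) none (some 3) = [a, b, c] := by
    intro a b c rest
    rw [show (3 : Int) = ((3 : Nat) : Int) by norm_num, PySem.List.slice_to_natCast]
    simp [List.take]
  fun_induction scan3 w
  next a b c rest h =>
    have hlen : (a :: b :: c :: rest).length - 2 = rest.length + 1 := by simp
    rw [hlen, List.range_succ_eq_map]
    simp [vswA_loop, hcur, window_eq_sameRun, h]
  next a b c rest h ih =>
    have hlen : (a :: b :: c :: rest).length - 2 = rest.length + 1 := by simp
    rw [hlen, List.range_succ_eq_map]
    simp [vswA_loop, hcur, window_eq_sameRun, h]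
    rw [vswA_loop_cons_map a (b :: c :: rest) (List.range rest.length)]
    have hl2 : rest.length = (b :: c :: rest).length - 2 := by simp
    rw [hl2]
    exact ih
  next t ht =>
    have hlen : t.length ≤ 2 := by
      by_contra hgt
      match t, hgt with
      | a :: b :: c :: r, _ => exact ht a b c r rfl
      | [], hgt => simp at hgt
      | [_], hgt => simp at hgt
      | [_, _], hgt => simp at hgt
    have h0 : t.length - 2 = 0 := by omega
    rw [h0]
    rfl

theorem sameRun_true_iff (a b c : Char) :
    sameRun a b c = true ↔
      vswB_class a = vswB_class b ∧ vswB_class b = vswB_class c ∧ vswB_class c ≠ none := by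
  simp [sameRun]

-- dropping a ≤2-length prefix before a non-letter character
theorem scan3_prefix_none (c : Char) (rest s : List Char) (hc : vswB_class c = none)
    (hs : s.length ≤ 2) : scan3 (s ++ c :: rest) = scan3 rest := by
  have g0 : ∀ (r : List Char), scan3 (c :: r) = scan3 r := by
    intro r
    match r with
    | [] => rfl
    | [_] => rfl
    | r0 :: r1 :: r' =>
      have : sameRun c r0 r1 = false := by
        rw [Bool.eq_false_iff]
        intro h
        rcases (sameRun_true_iff c r0 r1).1 h with ⟨h1, h2, h3⟩
        exact h3 (h2 ▸ h1 ▸ hc)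
      simp [scan3, this]
  have g1 : ∀ (x : Char) (r : List Char), scan3 (x :: c :: r) = scan3 (c :: r) := by
    intro x r
    match r with
    | [] => rfl
    | r0 :: r' =>
      have : sameRun x c r0 = false := by
        rw [Bool.eq_false_iff]
        intro h
        rcases (sameRun_true_iff x c r0).1 h with ⟨h1, h2, h3⟩
        exact h3 (h2 ▸ hc)
      simp [scan3, this]
  match s, hs with
  | [], _ => exact g0 rest
  | [x], _ => exact (g1 x rest).trans (g0 rest)
  | [x, y], _ =>
    have : sameRun x y c = false := by
      rw [Bool.eq_false_iff]
      intro h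
      rcases (sameRun_true_iff x y c).1 h with ⟨h1, h2, h3⟩
      exact h3 hc
    calc scan3 ([x, y] ++ c :: rest) = scan3 (y :: c :: rest) := by simp [scan3, this]
      _ = scan3 (c :: rest) := g1 y rest
      _ = scan3 rest := g0 rest

-- dropping a ≤2-length run of one class before a letter of a different class
theorem scan3_prefix_switch (c : Char) (rest s : List Char) (cls : Option Bool) (v : Bool)
    (hc : vswB_class c = some v) (hne : some v ≠ cls)
    (hall : ∀ x ∈ s, vswB_class x = cls) (hs : s.length ≤ 2) :
    scan3 (s ++ c :: rest) = scan3 (c :: rest) := by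
  have g1 : ∀ (x : Char), vswB_class x = cls → ∀ (r : List Char),
      scan3 (x :: c :: r) = scan3 (c :: r) := by
    intro x hx r
    match r with
    | [] => rfl
    | r0 :: r' =>
      have : sameRun x c r0 = false := by
        rw [Bool.eq_false_iff]
        intro h
        rcases (sameRun_true_iff x c r0).1 h with ⟨h1, h2, h3⟩
        have : some v = cls := by rw [← hc, ← h1, hx]
        exact hne this
      simp [scan3, this]
  match s, hs with
  | [], _ => rfl
  | [x], _ => exact g1 x (hall x (by simp)) rest
  | [x, y], _ =>
    have hy : vswB_class y = cls := hall y (by simp)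
    have : sameRun x y c = false := by
      rw [Bool.eq_false_iff]
      intro h
      rcases (sameRun_true_iff x y c).1 h with ⟨h1, h2, h3⟩
      have : some v = cls := by rw [← hc, ← h2, hy]
      exact hne this
    calc scan3 ([x, y] ++ c :: rest) = scan3 (y :: c :: rest) := by simp [scan3, this]
      _ = scan3 (c :: rest) := g1 y hy rest

theorem vswB_eq_scan3 (xs : List Char) : ∀ (s : List Char) (cls : Option Bool),
    s.length ≤ 2 → (∀ x ∈ s, vswB_class x = cls) →
    vswB_loop xs cls s.length = scan3 (s ++ xs) := by
  induction xs with
  | nil =>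
    intro s cls hs _
    simp only [vswB_loop, List.append_nil]
    exact (scan3_short s hs).symm
  | cons c rest ih =>
    intro s cls hs hall
    simp only [vswB_loop]
    split
    next hk =>
      have := ih [] none (by simp) (by simp)
      simp only [List.length_nil, List.nil_append] at this
      rw [this, scan3_prefix_none c rest s hk hs]
    next v hk =>
      by_cases heq : (some v : Option Bool) == cls
      · have hcls : cls = some v := by simpa [eq_comm] using (beq_iff_eq.1 heq)
        rw [if_pos heq]
        by_cases h3 : s.length + 1 = 3
        · have hs2 : s.length = 2 := by omega
          match s, hs2, hall with
          | [x, y], _, hall =>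
            have hsr : sameRun x y c = true := by
              rw [sameRun_true_iff]
              refine ⟨?_, ?_, ?_⟩
              · rw [hall x (by simp), hall y (by simp)]
              · rw [hall y (by simp), hk, hcls]
              · rw [hk]; simp
            simp [scan3, hsr]
        · have hb : (s.length + 1 == 3) = false := by simpa using h3
          rw [hb]
          simp only [Bool.false_eq_true, if_false]
          have hall' : ∀ x ∈ s ++ [c], vswB_class x = cls := by
            intro x hx
            rcases List.mem_append.1 hx with h | h
            · exact hall x h
            · simp at h; rw [h, hk, hcls]
          have := ih (s ++ [c]) cls (by simp; omega) hall'
          simpa using this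
      · have hb : ((some v : Option Bool) == cls) = false := by simpa using heq
        rw [hb]
        simp only [Bool.false_eq_true, if_false]
        have hne : (some v : Option Bool) ≠ cls := by
          intro h; rw [h] at hb; simp at hb
        have := ih [c] (some v) (by simp) (by intro x hx; simp at hx; rw [hx, hk])
        simp only [List.length_cons, List.length_nil, List.singleton_append] at this
        rw [this, scan3_prefix_switch c rest s cls v hk hne hall hs]

-- ===== VERDICT (by name: the statement is the Claim_ definition above) =====
theorem valid_succession_word_spec : Claim_equal_valid_succession_word := by
  intro word _
  unfold Spec_valid_succession_word valid_succession_word valid_succession_word_alt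
  simp only []
  rw [vswA_eq_scan3]
  have := vswB_eq_scan3 (PySem.Chars.lower word.toList) [] none (by simp) (by simp)
  simpa using this.symm
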